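-- pv_equiv track=rewrite | github.com/mishag/python-play | permutation.py | _apply_cycle
-- ===== SOURCE A (Python) =====
-- def _apply_cycle(cycle, X):
--     if len(cycle) in (0, 1):
--         return X
--
--     temp = X[cycle[-1]]
--
--     rcycle = tuple(reversed(cycle))
--     for i, _ in enumerate(rcycle):
--         if i == len(rcycle) - 1:
--             break
--         X[rcycle[i]] = X[rcycle[i+1]]
--
--     X[cycle[0]] = temp
--
--     return X
-- ===== SOURCE B (Python) =====
-- def _apply_cycle(cycle, X):
--     for k in range(len(cycle) - 1, 0, -1):
--         X[cycle[k]], X[cycle[k - 1]] = X[cycle[k - 1]], X[cycle[k]]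
--     return X
-- ===== Notes on version B (the rewrite author's own statement) =====
-- stated objective: simpler
-- what changed: Replaces A's save-temp / reversed-tuple shift loop (enumerate with a break, plus a length-0/1 guard and a final restore write) with a single backward loop of pairwise swaps that applies the cycle as a chain of transpositions; no temp, no reversed copy, no guard.
import Mathlib
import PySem

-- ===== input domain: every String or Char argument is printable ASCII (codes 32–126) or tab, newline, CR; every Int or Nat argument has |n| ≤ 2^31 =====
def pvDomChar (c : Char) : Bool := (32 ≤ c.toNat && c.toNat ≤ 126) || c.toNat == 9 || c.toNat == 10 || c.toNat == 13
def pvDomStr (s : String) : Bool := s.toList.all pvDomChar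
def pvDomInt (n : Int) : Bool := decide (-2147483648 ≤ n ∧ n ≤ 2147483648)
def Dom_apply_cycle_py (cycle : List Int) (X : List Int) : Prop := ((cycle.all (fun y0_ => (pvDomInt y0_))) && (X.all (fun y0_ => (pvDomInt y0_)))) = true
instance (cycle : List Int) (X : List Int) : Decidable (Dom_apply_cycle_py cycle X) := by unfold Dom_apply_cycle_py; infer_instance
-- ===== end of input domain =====

-- B replaces A's save-temp reverse-order shift with a backward loop of pairwise swaps (objective:
-- simpler); both A and B mutate X in place in Python — the equivalence proved here is about the
-- return value.

-- ===== PORT A =====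
-- literal transliteration of _apply_cycle; the 'break' at i == len(rcycle)-1 is the skip of the
-- last iteration (there is nothing after it in the loop body), ported as an 'if' that leaves the
-- accumulator unchanged.
def apply_cycle_py (cycle : List Int) (X : List Int) : List Int :=
  if cycle.length = 0 ∨ cycle.length = 1 then X
  else
    let temp := PySem.List.pyGetD X (PySem.List.pyGetD cycle (-1) 0) 0
    let rcycle := cycle.reverse
    let X1 := (PySem.List.pyRange 0 (rcycle.length : Int) 1).foldl
      (fun Xc i =>
        if i = (rcycle.length : Int) - 1 then Xc
        else PySem.List.pySetD Xc (PySem.List.pyGetD rcycle i 0)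
              (PySem.List.pyGetD Xc (PySem.List.pyGetD rcycle (i + 1) 0) 0)) X
    PySem.List.pySetD X1 (PySem.List.pyGetD cycle 0 0) temp

-- ===== PORT B =====
-- the Python tuple assignment evaluates both right-hand sides from the current X, then assigns
-- X[cycle[k]] first and X[cycle[k-1]] second — ported as two reads (a, b) followed by two writes.
def apply_cycle_py_alt (cycle : List Int) (X : List Int) : List Int :=
  (PySem.List.pyRange ((cycle.length : Int) - 1) 0 (-1)).foldl
    (fun Xc k =>
      let a := PySem.List.pyGetD Xc (PySem.List.pyGetD cycle (k - 1) 0) 0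
      let b := PySem.List.pyGetD Xc (PySem.List.pyGetD cycle k 0) 0
      PySem.List.pySetD (PySem.List.pySetD Xc (PySem.List.pyGetD cycle k 0) a)
        (PySem.List.pyGetD cycle (k - 1) 0) b) X

-- ===== PRECONDITION & SPEC =====
-- Pre_ excludes exactly the inputs on which the Python A raises IndexError: a cycle of length ≥ 2
-- containing an index out of range for X (B raises IndexError there too).
def Pre_apply_cycle_py (cycle : List Int) (X : List Int) : Prop :=
  2 ≤ cycle.length → ∀ i ∈ cycle, -(X.length : Int) ≤ i ∧ i < (X.length : Int)
instance (cycle : List Int) (X : List Int) : Decidable (Pre_apply_cycle_py cycle X) := by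
  unfold Pre_apply_cycle_py; infer_instance

def pvWitness_apply_cycle_py : List Int × List Int := ([0, 2, 1], [5, 6, 7])

def Spec_apply_cycle_py (cycle : List Int) (X : List Int) (out : List Int) : Prop :=
  out = apply_cycle_py_alt cycle X
instance (cycle : List Int) (X : List Int) (out : List Int) : Decidable (Spec_apply_cycle_py cycle X out) := by
  unfold Spec_apply_cycle_py; infer_instance

-- ===== CLAIM (what is proved, stated in full; the proofs are below) =====
def Claim_equal_apply_cycle_py : Prop :=
  ∀ (cycle : List Int) (X : List Int), Dom_apply_cycle_py cycle X →
    Pre_apply_cycle_py cycle X → Spec_apply_cycle_py cycle X (apply_cycle_py cycle X)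

-- ===== LEMMAS AND PROOFS =====

/-- Python's normalized index: the Nat position addressed by `i` in a list of length `m`. -/
def pvNorm (m : Nat) (i : Int) : Nat := (PySem.List.pyIdx? m i).getD 0

/-- A's loop, Nat level: steps j, j-1, …, 1; step j does X[pos j] := X[pos (j-1)]. -/
def pvLoopA (pos : Nat → Nat) : Nat → List Int → List Int
  | 0, Xc => Xc
  | j + 1, Xc => pvLoopA pos j (Xc.set (pos (j + 1)) (Xc.getD (pos j) 0))

/-- B's loop, Nat level: steps j, j-1, …, 1; step j swaps X[pos j] and X[pos (j-1)]. -/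
def pvLoopB (pos : Nat → Nat) : Nat → List Int → List Int
  | 0, Xc => Xc
  | j + 1, Xc => pvLoopB pos j
      ((Xc.set (pos (j + 1)) (Xc.getD (pos j) 0)).set (pos j) (Xc.getD (pos (j + 1)) 0))

lemma pv_pyIdx_eq (n : Nat) (i : Int) (h1 : -(n : Int) ≤ i) (h2 : i < (n : Int)) :
    PySem.List.pyIdx? n i = some (pvNorm n i) := by
  unfold pvNorm PySem.List.pyIdx?
  split_ifs <;> rfl

lemma pv_pvNorm_lt (n : Nat) (i : Int) (h1 : -(n : Int) ≤ i) (h2 : i < (n : Int)) :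
    pvNorm n i < n := by
  unfold pvNorm PySem.List.pyIdx?
  split_ifs <;> simp <;> omega

lemma pv_pvNorm_neg_one (n : Nat) (h : 1 ≤ n) : pvNorm n (-1) = n - 1 := by
  unfold pvNorm PySem.List.pyIdx?
  split_ifs <;> simp <;> omega

lemma pv_pySetD_norm (X : List Int) (i : Int) (v : Int)
    (h1 : -(X.length : Int) ≤ i) (h2 : i < (X.length : Int)) :
    PySem.List.pySetD X i v = X.set (pvNorm X.length i) v := by
  unfold PySem.List.pySetD PySem.List.pySet?
  rw [pv_pyIdx_eq _ _ h1 h2]; rfl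

lemma pv_pyGetD_norm (X : List Int) (i : Int) (d : Int)
    (h1 : -(X.length : Int) ≤ i) (h2 : i < (X.length : Int)) :
    PySem.List.pyGetD X i d = X.getD (pvNorm X.length i) d := by
  unfold PySem.List.pyGetD PySem.List.pyGet?
  rw [pv_pyIdx_eq _ _ h1 h2]
  simp [List.getD_eq_getElem?_getD]

lemma pv_rev_getD (l : List Int) (k : Nat) (h : k < l.length) :
    l.reverse.getD k 0 = l.getD (l.length - 1 - k) 0 := by
  rw [List.getD_eq_getElem _ _ (by simpa using h), List.getD_eq_getElem _ _ (by omega),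
    List.getElem_reverse]

lemma pv_getD_mem (cycle : List Int) (k : Nat) (hk : k < cycle.length) :
    cycle.getD k 0 ∈ cycle := by
  rw [List.getD_eq_getElem _ _ hk]; exact List.getElem_mem hk

/-- Convert A's loop body from PySem Int indexing to Nat set/getD (the value is a live read). -/
lemma pv_foldset_live (ks : List Nat) (t s : Nat → Int) : ∀ (X : List Int),
    (∀ k ∈ ks, (-(X.length : Int) ≤ t k ∧ t k < (X.length : Int)) ∧
               (-(X.length : Int) ≤ s k ∧ s k < (X.length : Int))) →
    ks.foldl (fun Xc k => PySem.List.pySetD Xc (t k) (PySem.List.pyGetD Xc (s k) 0)) X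
      = ks.foldl (fun Xc k => Xc.set (pvNorm X.length (t k)) (Xc.getD (pvNorm X.length (s k)) 0)) X := by
  induction ks with
  | nil => intro X _; rfl
  | cons a rest ih =>
    intro X h
    obtain ⟨⟨ht1, ht2⟩, ⟨hs1, hs2⟩⟩ := h a (List.mem_cons_self)
    simp only [List.foldl_cons]
    rw [pv_pyGetD_norm X (s a) 0 hs1 hs2, pv_pySetD_norm X (t a) _ ht1 ht2]
    rw [ih (X.set (pvNorm X.length (t a)) (X.getD (pvNorm X.length (s a)) 0)) (by
      simpa only [List.length_set] using fun k hk => h k (List.mem_cons_of_mem _ hk))]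
    simp only [List.length_set]

/-- Convert B's swap body from PySem Int indexing to Nat set/getD. -/
lemma pv_foldswap (ks : List Nat) (t s : Nat → Int) : ∀ (X : List Int),
    (∀ k ∈ ks, (-(X.length : Int) ≤ t k ∧ t k < (X.length : Int)) ∧
               (-(X.length : Int) ≤ s k ∧ s k < (X.length : Int))) →
    ks.foldl (fun Xc k =>
        PySem.List.pySetD (PySem.List.pySetD Xc (t k) (PySem.List.pyGetD Xc (s k) 0))
          (s k) (PySem.List.pyGetD Xc (t k) 0)) X
      = ks.foldl (fun Xc k =>
          (Xc.set (pvNorm X.length (t k)) (Xc.getD (pvNorm X.length (s k)) 0)).set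
            (pvNorm X.length (s k)) (Xc.getD (pvNorm X.length (t k)) 0)) X := by
  induction ks with
  | nil => intro X _; rfl
  | cons a rest ih =>
    intro X h
    obtain ⟨⟨ht1, ht2⟩, ⟨hs1, hs2⟩⟩ := h a (List.mem_cons_self)
    simp only [List.foldl_cons]
    rw [pv_pyGetD_norm X (s a) 0 hs1 hs2, pv_pyGetD_norm X (t a) 0 ht1 ht2,
      pv_pySetD_norm X (t a) _ ht1 ht2,
      pv_pySetD_norm _ (s a) _ (by simpa only [List.length_set] using hs1)
        (by simpa only [List.length_set] using hs2)]
    simp only [List.length_set]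
    rw [ih _ (by
      simpa only [List.length_set] using fun k hk => h k (List.mem_cons_of_mem _ hk))]
    simp only [List.length_set]

/-- `range(a, 0, -1)` for a Nat start `a` is `[a, a-1, …, 1]`. -/
lemma pv_pyRange_desc (a : Nat) :
    PySem.List.pyRange (a : Int) 0 (-1) = (List.range a).map (fun k : Nat => (a : Int) - (k : Int)) := by
  unfold PySem.List.pyRange
  rcases Nat.eq_zero_or_pos a with h | h
  · subst h; simp
  · rw [if_neg (by norm_num), if_neg (by norm_num), if_pos (by exact_mod_cast h)]
    have hc : (((a : Int) - 0 + -(-1) - 1) / -(-1)).toNat = a := by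
      norm_num
    simp only [hc]
    apply List.map_congr_left
    intro k _
    ring

lemma pv_fold_loopA (pos : Nat → Nat) : ∀ (r : Nat) (X : List Int),
    (List.range r).foldl (fun Xc k => Xc.set (pos (r - k)) (Xc.getD (pos (r - k - 1)) 0)) X
      = pvLoopA pos r X := by
  intro r
  induction r with
  | zero => intro X; rfl
  | succ r ih =>
    intro X
    rw [List.range_succ_eq_map, List.foldl_cons, List.foldl_map]
    simp only [Nat.sub_zero, Nat.succ_sub_succ]
    exact ih _

lemma pv_fold_loopB (pos : Nat → Nat) : ∀ (r : Nat) (X : List Int),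
    (List.range r).foldl (fun Xc k =>
        (Xc.set (pos (r - k)) (Xc.getD (pos (r - k - 1)) 0)).set
          (pos (r - k - 1)) (Xc.getD (pos (r - k)) 0)) X
      = pvLoopB pos r X := by
  intro r
  induction r with
  | zero => intro X; rfl
  | succ r ih =>
    intro X
    rw [List.range_succ_eq_map, List.foldl_cons, List.foldl_map]
    simp only [Nat.sub_zero, Nat.succ_sub_succ]
    exact ih _

/-- The key invariant: if B's state differs from A's only at `pos j`, where B already holds the
value `t` that A will only write at the very end (at `pos 0`), then running the remaining swap
steps of B equals running the remaining shift steps of A and then writing `t` at `pos 0`. -/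
lemma pv_inv (pos : Nat → Nat) : ∀ (j : Nat) (XA : List Int) (t : Int),
    (∀ i, i ≤ j → pos i < XA.length) →
    pvLoopB pos j (XA.set (pos j) t) = (pvLoopA pos j XA).set (pos 0) t := by
  intro j
  induction j with
  | zero => intro XA t _; rfl
  | succ j ih =>
    intro XA t hb
    have hlt1 : pos (j + 1) < XA.length := hb (j + 1) (le_refl _)
    have hltj : pos j < XA.length := hb j (by omega)
    simp only [pvLoopA, pvLoopB]
    have hbval : (XA.set (pos (j + 1)) t).getD (pos (j + 1)) 0 = t := by
      rw [List.getD_eq_getElem?_getD, List.getElem?_set_self hlt1]; rfl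
    by_cases hpp : pos j = pos (j + 1)
    · have haval : (XA.set (pos (j + 1)) t).getD (pos j) 0 = t := by
        rw [hpp]; exact hbval
      have hstep : ((XA.set (pos (j + 1)) t).set (pos (j + 1))
            ((XA.set (pos (j + 1)) t).getD (pos j) 0)).set (pos j)
            ((XA.set (pos (j + 1)) t).getD (pos (j + 1)) 0)
          = XA.set (pos j) t := by
        rw [haval, hbval, List.set_set, ← hpp, List.set_set]
      rw [hstep]
      have hXA : XA.set (pos (j + 1)) (XA.getD (pos j) 0) = XA := by
        rw [← hpp, List.getD_eq_getElem _ _ hltj, List.set_getElem_self]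
      rw [hXA]
      exact ih XA t (fun i hi => hb i (by omega))
    · have haval : (XA.set (pos (j + 1)) t).getD (pos j) 0 = XA.getD (pos j) 0 := by
        rw [List.getD_eq_getElem?_getD, List.getElem?_set_ne (fun h => hpp h.symm),
          List.getD_eq_getElem?_getD]
      have hstep : ((XA.set (pos (j + 1)) t).set (pos (j + 1))
            ((XA.set (pos (j + 1)) t).getD (pos j) 0)).set (pos j)
            ((XA.set (pos (j + 1)) t).getD (pos (j + 1)) 0)
          = (XA.set (pos (j + 1)) (XA.getD (pos j) 0)).set (pos j) t := by
        rw [haval, hbval, List.set_set]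
      rw [hstep]
      exact ih (XA.set (pos (j + 1)) (XA.getD (pos j) 0)) t (by
        intro i hi
        rw [List.length_set]
        exact hb i (by omega))

lemma pv_B_small (cycle X : List Int) (h01 : cycle.length = 0 ∨ cycle.length = 1) :
    apply_cycle_py_alt cycle X = X := by
  unfold apply_cycle_py_alt
  rcases h01 with h | h <;> rw [h]
  · have : PySem.List.pyRange (((0 : Nat) : Int) - 1) 0 (-1) = [] := by decide
    rw [this]; rfl
  · have : PySem.List.pyRange (((1 : Nat) : Int) - 1) 0 (-1) = [] := by decide
    rw [this]; rfl

lemma pv_loopA_len (pos : Nat → Nat) : ∀ (r : Nat) (X : List Int),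
    (pvLoopA pos r X).length = X.length := by
  intro r
  induction r with
  | zero => intro X; rfl
  | succ r ih =>
    intro X
    rw [pvLoopA, ih, List.length_set]

lemma pv_A_eq (cycle X : List Int) (h2 : 2 ≤ cycle.length)
    (hin : ∀ i ∈ cycle, -(X.length : Int) ≤ i ∧ i < (X.length : Int)) :
    apply_cycle_py cycle X =
      (pvLoopA (fun j => pvNorm X.length (cycle.getD j 0)) (cycle.length - 1) X).set
        (pvNorm X.length (cycle.getD 0 0))
        (X.getD (pvNorm X.length (cycle.getD (cycle.length - 1) 0)) 0) := by
  have h01 : ¬(cycle.length = 0 ∨ cycle.length = 1) := by omega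
  have hbnd : ∀ k, k < cycle.length →
      -(X.length : Int) ≤ cycle.getD k 0 ∧ cycle.getD k 0 < (X.length : Int) :=
    fun k hk => hin _ (pv_getD_mem cycle k hk)
  have hrevg : ∀ k, k < cycle.length →
      cycle.reverse.getD k 0 = cycle.getD (cycle.length - 1 - k) 0 :=
    fun k hk => pv_rev_getD cycle k hk
  have hrbnd : ∀ k, k < cycle.length →
      -(X.length : Int) ≤ cycle.reverse.getD k 0 ∧ cycle.reverse.getD k 0 < (X.length : Int) := by
    intro k hk; rw [hrevg k hk]; exact hbnd _ (by omega)
  unfold apply_cycle_py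
  rw [if_neg h01]
  simp only [List.length_reverse, PySem.List.pyRange_zero_natCast, List.foldl_map]
  have hrs : List.range cycle.length = List.range (cycle.length - 1) ++ [cycle.length - 1] := by
    conv_lhs => rw [show cycle.length = (cycle.length - 1) + 1 by omega]
    exact List.range_succ
  rw [hrs, List.foldl_append]
  simp only [List.foldl_cons, List.foldl_nil]
  rw [if_pos (by omega : ((cycle.length - 1 : Nat) : Int) = (cycle.length : Int) - 1)]
  have hcg := PySem.List.foldl_congr_mem (List.range (cycle.length - 1))
    (fun Xc k => if ((k : Nat) : Int) = (cycle.length : Int) - 1 then Xc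
      else PySem.List.pySetD Xc (PySem.List.pyGetD cycle.reverse ((k : Nat) : Int) 0)
        (PySem.List.pyGetD Xc (PySem.List.pyGetD cycle.reverse (((k : Nat) : Int) + 1) 0) 0))
    (fun Xc k => PySem.List.pySetD Xc (cycle.reverse.getD k 0)
      (PySem.List.pyGetD Xc (cycle.reverse.getD (k + 1) 0) 0))
    X (by
      intro acc k hk
      have hk' : k < cycle.length - 1 := List.mem_range.mp hk
      beta_reduce
      rw [if_neg (by omega : ¬(((k : Nat) : Int) = (cycle.length : Int) - 1))]
      rw [show ((k : Nat) : Int) + 1 = ((k + 1 : Nat) : Int) by push_cast; ring]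
      rw [PySem.List.pyGetD_natCast, PySem.List.pyGetD_natCast])
  rw [hcg]
  rw [pv_foldset_live (List.range (cycle.length - 1))
    (fun k => cycle.reverse.getD k 0) (fun k => cycle.reverse.getD (k + 1) 0) X (by
      intro k hk
      have hk' : k < cycle.length - 1 := List.mem_range.mp hk
      exact ⟨hrbnd k (by omega), hrbnd (k + 1) (by omega)⟩)]
  have hcg2 := PySem.List.foldl_congr_mem (List.range (cycle.length - 1))
    (fun Xc k => Xc.set (pvNorm X.length (cycle.reverse.getD k 0))
      (Xc.getD (pvNorm X.length (cycle.reverse.getD (k + 1) 0)) 0))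
    (fun Xc k => Xc.set (pvNorm X.length (cycle.getD (cycle.length - 1 - k) 0))
      (Xc.getD (pvNorm X.length (cycle.getD (cycle.length - 1 - k - 1) 0)) 0))
    X (by
      intro acc k hk
      have hk' : k < cycle.length - 1 := List.mem_range.mp hk
      beta_reduce
      rw [hrevg k (by omega), hrevg (k + 1) (by omega),
        show cycle.length - 1 - (k + 1) = cycle.length - 1 - k - 1 by omega])
  rw [hcg2, pv_fold_loopA (fun j => pvNorm X.length (cycle.getD j 0)) (cycle.length - 1) X]
  -- the final write X[cycle[0]] = temp, and temp = X[cycle[-1]]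
  have hXlen : (pvLoopA (fun j => pvNorm X.length (cycle.getD j 0))
      (cycle.length - 1) X).length = X.length := pv_loopA_len _ _ X
  rw [PySem.List.pyGetD_zero]
  obtain ⟨b01, b02⟩ := hbnd 0 (by omega)
  rw [pv_pySetD_norm _ (cycle.getD 0 0) _ (by rw [hXlen]; exact b01)
    (by rw [hXlen]; exact b02), hXlen]
  have hc1 : PySem.List.pyGetD cycle (-1) 0 = cycle.getD (cycle.length - 1) 0 := by
    rw [pv_pyGetD_norm cycle (-1) 0 (by omega) (by omega),
      pv_pvNorm_neg_one cycle.length (by omega)]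
  rw [hc1]
  obtain ⟨b1, b2⟩ := hbnd (cycle.length - 1) (by omega)
  rw [pv_pyGetD_norm X _ 0 b1 b2]

lemma pv_B_eq (cycle X : List Int) (h2 : 2 ≤ cycle.length)
    (hin : ∀ i ∈ cycle, -(X.length : Int) ≤ i ∧ i < (X.length : Int)) :
    apply_cycle_py_alt cycle X =
      pvLoopB (fun j => pvNorm X.length (cycle.getD j 0)) (cycle.length - 1) X := by
  have hbnd : ∀ k, k < cycle.length →
      -(X.length : Int) ≤ cycle.getD k 0 ∧ cycle.getD k 0 < (X.length : Int) :=
    fun k hk => hin _ (pv_getD_mem cycle k hk)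
  unfold apply_cycle_py_alt
  rw [show ((cycle.length : Int) - 1) = ((cycle.length - 1 : Nat) : Int) by omega]
  rw [pv_pyRange_desc (cycle.length - 1), List.foldl_map]
  refine Eq.trans (PySem.List.foldl_congr_mem (List.range (cycle.length - 1)) _
    (fun Xc k =>
      PySem.List.pySetD
        (PySem.List.pySetD Xc (cycle.getD (cycle.length - 1 - k) 0)
          (PySem.List.pyGetD Xc (cycle.getD (cycle.length - 1 - k - 1) 0) 0))
        (cycle.getD (cycle.length - 1 - k - 1) 0)
        (PySem.List.pyGetD Xc (cycle.getD (cycle.length - 1 - k) 0) 0)) X ?_) ?_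
  · intro acc k hk
    have hk' : k < cycle.length - 1 := List.mem_range.mp hk
    show PySem.List.pySetD
        (PySem.List.pySetD acc
          (PySem.List.pyGetD cycle (((cycle.length - 1 : Nat) : Int) - (k : Int)) 0)
          (PySem.List.pyGetD acc
            (PySem.List.pyGetD cycle ((((cycle.length - 1 : Nat) : Int) - (k : Int)) - 1) 0) 0))
        (PySem.List.pyGetD cycle ((((cycle.length - 1 : Nat) : Int) - (k : Int)) - 1) 0)
        (PySem.List.pyGetD acc
          (PySem.List.pyGetD cycle (((cycle.length - 1 : Nat) : Int) - (k : Int)) 0) 0) = _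
    rw [show (((cycle.length - 1 : Nat) : Int) - (k : Int))
        = ((cycle.length - 1 - k : Nat) : Int) by omega]
    rw [show (((cycle.length - 1 - k : Nat) : Int) - 1)
        = ((cycle.length - 1 - k - 1 : Nat) : Int) by omega]
    rw [PySem.List.pyGetD_natCast, PySem.List.pyGetD_natCast]
  · rw [pv_foldswap (List.range (cycle.length - 1))
      (fun k => cycle.getD (cycle.length - 1 - k) 0)
      (fun k => cycle.getD (cycle.length - 1 - k - 1) 0) X (by
        intro k hk
        have hk' : k < cycle.length - 1 := List.mem_range.mp hk
        exact ⟨hbnd (cycle.length - 1 - k) (by omega),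
          hbnd (cycle.length - 1 - k - 1) (by omega)⟩)]
    exact pv_fold_loopB (fun j => pvNorm X.length (cycle.getD j 0)) (cycle.length - 1) X

lemma pv_main (cycle X : List Int)
    (hpre : 2 ≤ cycle.length → ∀ i ∈ cycle, -(X.length : Int) ≤ i ∧ i < (X.length : Int)) :
    apply_cycle_py cycle X = apply_cycle_py_alt cycle X := by
  by_cases h01 : cycle.length = 0 ∨ cycle.length = 1
  · rw [pv_B_small cycle X h01]
    unfold apply_cycle_py
    rw [if_pos h01]
  · have h2 : 2 ≤ cycle.length := by omega
    have hin := hpre h2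
    have hbnd : ∀ k, k < cycle.length →
        -(X.length : Int) ≤ cycle.getD k 0 ∧ cycle.getD k 0 < (X.length : Int) :=
      fun k hk => hin _ (pv_getD_mem cycle k hk)
    have hposlt : ∀ i, i ≤ cycle.length - 1 →
        pvNorm X.length (cycle.getD i 0) < X.length := by
      intro i hi
      obtain ⟨b1, b2⟩ := hbnd i (by omega)
      exact pv_pvNorm_lt _ _ b1 b2
    rw [pv_A_eq cycle X h2 hin, pv_B_eq cycle X h2 hin]
    have hXid : X.set (pvNorm X.length (cycle.getD (cycle.length - 1) 0))
        (X.getD (pvNorm X.length (cycle.getD (cycle.length - 1) 0)) 0) = X := by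
      rw [List.getD_eq_getElem _ _ (hposlt (cycle.length - 1) (by omega)),
        List.set_getElem_self]
    have hinv := pv_inv (fun j => pvNorm X.length (cycle.getD j 0)) (cycle.length - 1) X
      (X.getD (pvNorm X.length (cycle.getD (cycle.length - 1) 0)) 0) hposlt
    rw [hXid] at hinv
    exact hinv.symm

-- ===== VERDICT (by name: the statement is the Claim_ definition above) =====
theorem apply_cycle_py_spec : Claim_equal_apply_cycle_py := by
  intro cycle X _ hpre
  unfold Spec_apply_cycle_py
  exact pv_main cycle X hpre
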